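-- pv_equiv track=rewrite | github.com/ostis-apps/data2sc-parser | CourseProject/main.py | filter_companies
-- ===== SOURCE A (Python) =====
-- def filter_companies(companies):
--     for num in range(len(companies)):
--         companies[num] = companies[num].replace('\\&quot;', '')
--         companies[num] = companies[num].replace(' - ', '_')
--         companies[num] = companies[num].replace(' ', '_')
--         companies[num] = companies[num].replace('.', '')
--         companies[num] = companies[num].replace(',', '')
--         companies[num] = companies[num].replace('(', '')
--         companies[num] = companies[num].replace(')', '')
--         companies[num] = companies[num].replace('/', '_')
--
--     return companies
-- ===== SOURCE B (Python) =====
-- def filter_companies(companies):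
--     for num in range(len(companies)):
--         s = companies[num]
--         # pass 1: delete every occurrence of '\&quot;' with one index scan
--         kept = []
--         i = 0
--         while i < len(s):
--             if s.startswith('\\&quot;', i):
--                 i += 7
--             else:
--                 kept.append(s[i])
--                 i += 1
--         t = ''.join(kept)
--         # pass 2: one scanner handling ' - ' and all single characters together
--         out = []
--         i = 0
--         while i < len(t):
--             if t.startswith(' - ', i):
--                 out.append('_')
--                 i += 3
--             else:
--                 c = t[i]
--                 if c == ' ' or c == '/':
--                     out.append('_')
--                 elif c not in '.,()':
--                     out.append(c)
--                 i += 1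
--         companies[num] = ''.join(out)
--     return companies
-- ===== Notes on version B (the rewrite author's own statement) =====
-- stated objective: alternative
-- what changed: A rewrites each string with eight sequential global str.replace passes; B never calls replace: it runs a hand-written left-to-right index scanner over each string (one pass deleting the 7-char '\&quot;' token, then one pass that matches ' - ' and maps/deletes single characters in the same scan), building the result in an accumulator.
import Mathlib
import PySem

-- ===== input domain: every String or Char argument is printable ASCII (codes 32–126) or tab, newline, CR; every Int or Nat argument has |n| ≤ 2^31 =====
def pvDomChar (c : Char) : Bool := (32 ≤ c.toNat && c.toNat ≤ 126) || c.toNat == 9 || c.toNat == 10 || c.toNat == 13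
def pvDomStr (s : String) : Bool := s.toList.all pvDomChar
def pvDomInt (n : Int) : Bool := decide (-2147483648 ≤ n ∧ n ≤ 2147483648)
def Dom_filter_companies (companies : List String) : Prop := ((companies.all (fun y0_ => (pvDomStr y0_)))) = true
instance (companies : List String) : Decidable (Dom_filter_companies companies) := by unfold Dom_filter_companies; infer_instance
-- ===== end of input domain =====

-- ===== PORT A =====
-- B replaces A's eight sequential global .replace passes by two hand-written
-- left-to-right index scanners per string (no .replace at all); objective: alternative.
-- A mutates its argument in place in Python; the equivalence proved here is about the
-- return value only (B performs the same in-place mutation in Python).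

-- one iteration of A's loop body: the eight sequential replaces
def pvStepA (s : String) : String :=
  let s := PySem.Str.replace s "\\&quot;" ""
  let s := PySem.Str.replace s " - " "_"
  let s := PySem.Str.replace s " " "_"
  let s := PySem.Str.replace s "." ""
  let s := PySem.Str.replace s "," ""
  let s := PySem.Str.replace s "(" ""
  let s := PySem.Str.replace s ")" ""
  PySem.Str.replace s "/" "_"

def filter_companies (companies : List String) : List String :=
  companies.map pvStepA

-- ===== PORT B =====
-- the 7-character token '\&quot;' deleted by Source B's first scan
def pvQuot : List Char := ['\\', '&', 'q', 'u', 'o', 't', ';']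

-- Source B's first while loop: scan the string once, skipping each occurrence of pvQuot
def pvScan1 : List Char → List Char
  | [] => []
  | c :: t =>
      if pvQuot.isPrefixOf (c :: t) then pvScan1 (t.drop 6) else c :: pvScan1 t
termination_by l => l.length
decreasing_by
  · simp only [List.length_drop, List.length_cons]; omega
  · simp

-- Source B's second while loop: one scan matching ' - ' and the single characters together
def pvScan2 : List Char → List Char
  | [] => []
  | c :: t =>
      if [' ', '-', ' '].isPrefixOf (c :: t) then '_' :: pvScan2 (t.drop 2)
      else if c = ' ' ∨ c = '/' then '_' :: pvScan2 t
      else if c = '.' ∨ c = ',' ∨ c = '(' ∨ c = ')' then pvScan2 t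
      else c :: pvScan2 t
termination_by l => l.length
decreasing_by
  · simp only [List.length_drop, List.length_cons]; omega
  · simp
  · simp
  · simp

def pvStepB (s : String) : String :=
  String.ofList (pvScan2 (pvScan1 s.toList))

def filter_companies_alt (companies : List String) : List String :=
  companies.map pvStepB

-- ===== PRECONDITION & SPEC =====
def Spec_filter_companies (companies : List String) (out : List String) : Prop := out = filter_companies_alt companies
instance (companies : List String) (out : List String) : Decidable (Spec_filter_companies companies out) := by unfold Spec_filter_companies; infer_instance

-- ===== CLAIM (what is proved, stated in full; the proofs are below) =====
def Claim_equal_filter_companies : Prop := ∀ (companies : List String), Dom_filter_companies companies → Spec_filter_companies companies (filter_companies companies)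

-- ===== LEMMAS AND PROOFS =====

-- proof-side character table: the joint effect of A's six single-character replaces
def pvTable (c : Char) : Option Char :=
  if c = ' ' then some '_'
  else if c = '/' then some '_'
  else if c = '.' ∨ c = ',' ∨ c = '(' ∨ c = ')' then none
  else some c

-- a single-character replace is a character-wise flatMap
theorem pv_go_single (c : Char) (new : List Char) :
    ∀ (l acc : List Char),
      PySem.Chars.replace.go [c] new l.length l acc
        = acc.reverse ++ l.flatMap (fun a => if a = c then new else [a]) := by
  intro l
  induction l with
  | nil => intro acc; simp [PySem.Chars.replace.go]
  | cons a t ih =>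
      intro acc
      simp only [List.length_cons, PySem.Chars.replace.go]
      by_cases h : a = c
      · subst h
        simp [List.isPrefixOf, ih, List.flatMap_cons]
      · have hp : [c].isPrefixOf (a :: t) = false := by
          simp [List.isPrefixOf]; intro hc; exact absurd hc.symm h
        simp [hp, ih, List.flatMap_cons, h]

theorem pv_replace_single (cs : List Char) (c : Char) (new : List Char) :
    PySem.Chars.replace cs [c] new = cs.flatMap (fun a => if a = c then new else [a]) := by
  have := pv_go_single c new cs []
  simpa [PySem.Chars.replace] using this

-- the six single-character replaces of A collapse to one filterMap by pvTable
theorem pv_chain (cs : List Char) :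
    PySem.Chars.replace
      (PySem.Chars.replace
        (PySem.Chars.replace
          (PySem.Chars.replace
            (PySem.Chars.replace
              (PySem.Chars.replace cs [' '] ['_'])
              ['.'] [])
            [','] [])
          ['('] [])
        [')'] [])
      ['/'] ['_']
    = cs.filterMap pvTable := by
  rw [pv_replace_single, pv_replace_single, pv_replace_single, pv_replace_single,
      pv_replace_single, pv_replace_single, List.filterMap_eq_flatMap_toList]
  simp only [List.flatMap_assoc]
  congr 1
  funext a
  by_cases h1 : a = ' ' <;> by_cases h2 : a = '/' <;>
    by_cases h3 : a = '.' <;> by_cases h4 : a = ',' <;>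
      by_cases h5 : a = '(' <;> by_cases h6 : a = ')' <;>
        simp_all [pvTable]

-- A's first replace (delete '\&quot;') computes exactly B's first scanner
theorem pv_go_quot :
    ∀ (fuel : Nat) (l acc : List Char), l.length ≤ fuel →
      PySem.Chars.replace.go pvQuot [] fuel l acc = acc.reverse ++ pvScan1 l := by
  intro fuel
  induction fuel with
  | zero =>
      intro l acc h
      have hl : l = [] := by cases l <;> simp_all
      subst hl
      simp [PySem.Chars.replace.go, pvScan1]
  | succ n ih =>
      intro l acc h
      cases l with
      | nil => simp [PySem.Chars.replace.go, pvScan1]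
      | cons c t =>
          rw [pvScan1]
          by_cases hp : pvQuot.isPrefixOf (c :: t)
          · have h7 : 7 ≤ (c :: t).length := by
              have := List.IsPrefix.length_le (List.isPrefixOf_iff_prefix.mp hp)
              simpa [pvQuot] using this
            simp only [PySem.Chars.replace.go, hp, if_true, List.reverse_nil,
              List.nil_append]
            have hdrop : List.drop pvQuot.length (c :: t) = t.drop 6 := by
              simp [pvQuot]
            rw [hdrop, ih]
            simp only [List.length_drop, List.length_cons] at *
            omega
          · simp only [PySem.Chars.replace.go, hp, Bool.false_eq_true, if_false]
            rw [ih t (c :: acc) (by simp at h ⊢; omega)]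
            simp

theorem pv_replace_quot (cs : List Char) :
    PySem.Chars.replace cs pvQuot [] = pvScan1 cs := by
  have := pv_go_quot cs.length cs [] (le_refl _)
  simpa [PySem.Chars.replace, pvQuot] using this

-- A's ' - '→'_' replace followed by the six single-char replaces (= pvTable filterMap)
-- computes exactly B's second scanner
theorem pv_go_dash :
    ∀ (fuel : Nat) (l acc : List Char), l.length ≤ fuel →
      List.filterMap pvTable (PySem.Chars.replace.go [' ', '-', ' '] ['_'] fuel l acc)
        = List.filterMap pvTable acc.reverse ++ pvScan2 l := by
  intro fuel
  induction fuel with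
  | zero =>
      intro l acc h
      have hl : l = [] := by cases l <;> simp_all
      subst hl
      simp [PySem.Chars.replace.go, pvScan2]
  | succ n ih =>
      intro l acc h
      cases l with
      | nil => simp [PySem.Chars.replace.go, pvScan2]
      | cons c t =>
          rw [pvScan2]
          by_cases hp : [' ', '-', ' '].isPrefixOf (c :: t)
          · have h3 : 3 ≤ (c :: t).length := by
              have := List.IsPrefix.length_le (List.isPrefixOf_iff_prefix.mp hp)
              simpa using this
            simp only [PySem.Chars.replace.go, hp, if_true]
            have hdrop : List.drop ([' ', '-', ' '] : List Char).length (c :: t) = t.drop 2 := by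
              simp
            rw [hdrop, ih]
            · simp [pvTable]
            · simp only [List.length_drop, List.length_cons] at *
              omega
          · simp only [PySem.Chars.replace.go, hp, Bool.false_eq_true, if_false]
            rw [ih t (c :: acc) (by simp at h ⊢; omega)]
            simp only [List.reverse_cons, List.filterMap_append]
            by_cases h1 : c = ' ' ∨ c = '/'
            · rcases h1 with h1 | h1 <;> subst h1 <;> simp [pvTable]
            · by_cases h2 : c = '.' ∨ c = ',' ∨ c = '(' ∨ c = ')'
              · simp only [if_neg h1, if_pos h2]
                rcases h2 with h2 | h2 | h2 | h2 <;> subst h2 <;> simp [pvTable]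
              · have hc : pvTable c = some c := by
                  have hA : c ≠ ' ' := fun e => h1 (Or.inl e)
                  have hB : c ≠ '/' := fun e => h1 (Or.inr e)
                  simp [pvTable, hA, hB, h2]
                simp [if_neg h1, if_neg h2, hc]

theorem pv_replace_dash (cs : List Char) :
    List.filterMap pvTable (PySem.Chars.replace cs [' ', '-', ' '] ['_']) = pvScan2 cs := by
  have := pv_go_dash cs.length cs [] (le_refl _)
  simpa [PySem.Chars.replace] using this

theorem pv_step_eq (s : String) : pvStepA s = pvStepB s := by
  apply String.toList_inj.mp
  simp only [pvStepA, pvStepB, PySem.Str.toList_replace, String.toList_ofList]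
  have hq : ("\\&quot;" : String).toList = pvQuot := by decide
  have hd : (" - " : String).toList = ([' ', '-', ' '] : List Char) := by decide
  have h1 : ("_" : String).toList = ['_'] := by decide
  have h0 : ("" : String).toList = ([] : List Char) := by decide
  rw [hq, hd, h1, h0]
  have hs : ((" " : String).toList, ("." : String).toList, ("," : String).toList,
      ("(" : String).toList, (")" : String).toList, ("/" : String).toList)
      = ([' '], ['.'], [','], ['('], [')'], ['/']) := by decide
  simp only [Prod.mk.injEq] at hs
  obtain ⟨e1, e2, e3, e4, e5, e6⟩ := hs
  rw [e1, e2, e3, e4, e5, e6, pv_chain, pv_replace_quot, pv_replace_dash]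

-- ===== VERDICT (by name: the statement is the Claim_ definition above) =====
theorem filter_companies_spec : Claim_equal_filter_companies := by
  intro companies _
  unfold Spec_filter_companies filter_companies filter_companies_alt
  exact List.map_congr_left fun s _ => pv_step_eq s
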